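-- pv_equiv track=rewrite | github.com/SsyHow/Codeforces2 | 316a2/main.py | f
-- ===== SOURCE A (Python) =====
-- def f(n, a):
--     ans = 1
--     k = 10
--
--     while n > 0:
--         ans *= k
--         k -= 1
--         n -= 1
--     if a == 1:
--         ans //= 10
--         ans *= 9
--     return ans
-- ===== SOURCE B (Python) =====
-- # Closed-form table of the falling factorial 10*9*...*(11-n), capped: 0 for n >= 11, 1 for n <= 0.
-- _FALL = [1, 10, 90, 720, 5040, 30240, 151200, 604800, 1814400, 3628800, 3628800, 0]
--
-- def f(n, a):
--     ans = _FALL[min(max(n, 0), 11)]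
--     return ans // 10 * 9 if a == 1 else ans
-- ===== Notes on version B (the rewrite author's own statement) =====
-- stated objective: faster
-- what changed: B replaces the counting while-loop by a constant-time lookup of the closed-form falling factorial (clamped to 0 beyond n=10 and 1 below n=1), then applies the same a==1 correction.
import Mathlib
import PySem

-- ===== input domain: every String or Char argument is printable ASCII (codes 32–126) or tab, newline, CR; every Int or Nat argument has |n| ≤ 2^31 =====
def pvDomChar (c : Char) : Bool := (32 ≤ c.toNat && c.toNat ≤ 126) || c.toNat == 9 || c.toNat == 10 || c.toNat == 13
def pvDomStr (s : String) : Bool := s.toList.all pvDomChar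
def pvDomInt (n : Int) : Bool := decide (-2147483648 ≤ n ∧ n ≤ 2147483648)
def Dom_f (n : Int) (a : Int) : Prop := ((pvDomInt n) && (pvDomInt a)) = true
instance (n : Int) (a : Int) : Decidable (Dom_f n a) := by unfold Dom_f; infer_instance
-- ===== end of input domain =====

-- B replaces A's counting while-loop by a constant-time table lookup of the closed-form
-- falling factorial (0 beyond n = 10, 1 below n = 1), then the same a == 1 correction.

-- ===== PORT A =====
-- the while loop: state (n, ans, k)
def fA_loop (n ans k : Int) : Int :=
  if n > 0 then fA_loop (n - 1) (ans * k) (k - 1) else ans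
termination_by n.toNat
decreasing_by omega

def f (n : Int) (a : Int) : Int :=
  let ans := fA_loop n 1 10
  if a == 1 then (PySem.Int.floordiv ans 10) * 9 else ans

-- ===== PORT B =====
def fallTable : List Int := [1, 10, 90, 720, 5040, 30240, 151200, 604800, 1814400, 3628800, 3628800, 0]

def f_alt (n : Int) (a : Int) : Int :=
  -- index min (max n 0) 11 is always in range of the 12-entry table, so pyGet? is some; getD 0 never fires
  let ans := (PySem.List.pyGet? fallTable (min (max n 0) 11)).getD 0
  if a == 1 then (PySem.Int.floordiv ans 10) * 9 else ans

-- ===== PRECONDITION & SPEC =====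
def Spec_f (n : Int) (a : Int) (out : Int) : Prop := out = f_alt n a
instance (n : Int) (a : Int) (out : Int) : Decidable (Spec_f n a out) := by unfold Spec_f; infer_instance

-- ===== CLAIM (what is proved, stated in full; the proofs are below) =====
def Claim_equal_f : Prop := ∀ (n : Int) (a : Int), Dom_f n a → Spec_f n a (f n a)

-- ===== LEMMAS AND PROOFS =====

-- once the accumulator is 0 it stays 0
lemma fA_loop_zero (m : Nat) : ∀ (n k : Int), n.toNat = m → fA_loop n 0 k = 0 := by
  induction m with
  | zero =>
    intro n k h
    rw [fA_loop, if_neg (by omega)]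
  | succ m ih =>
    intro n k h
    rw [fA_loop, if_pos (by omega), zero_mul]
    exact ih _ _ (by omega)

-- if the countdown k reaches 0 before n does, the product is 0
lemma fA_loop_hits_zero (m : Nat) :
    ∀ (n ans k : Int), n.toNat = m → 0 ≤ k → k < n → fA_loop n ans k = 0 := by
  induction m with
  | zero => intro n ans k h hk hkn; omega
  | succ m ih =>
    intro n ans k h hk hkn
    rw [fA_loop, if_pos (by omega)]
    by_cases h0 : k = 0
    · subst h0
      rw [mul_zero]
      exact fA_loop_zero _ _ _ rfl
    · exact ih _ _ _ (by omega) (by omega) (by omega)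

lemma fA_loop_pos (n ans k : Int) (h : n > 0) :
    fA_loop n ans k = fA_loop (n - 1) (ans * k) (k - 1) := by
  rw [fA_loop, if_pos h]

lemma fA_loop_nonpos (n ans k : Int) (h : ¬ n > 0) : fA_loop n ans k = ans := by
  rw [fA_loop, if_neg h]

lemma loop_eq_table (n : Int) :
    fA_loop n 1 10 = (PySem.List.pyGet? fallTable (min (max n 0) 11)).getD 0 := by
  by_cases h : n ≤ 0
  · have hmin : min (max n 0) 11 = 0 := by omega
    rw [fA_loop_nonpos _ _ _ (by omega), hmin]
    decide
  · by_cases h11 : 11 ≤ n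
    · have hmin : min (max n 0) 11 = 11 := by omega
      rw [fA_loop_hits_zero n.toNat n 1 10 rfl (by omega) (by omega), hmin]
      decide
    · interval_cases n <;>
        norm_num [fA_loop_pos, fA_loop_nonpos, fallTable, PySem.List.pyGet?, PySem.List.pyIdx?] <;>
        decide

-- ===== VERDICT (by name: the statement is the Claim_ definition above) =====
theorem f_spec : Claim_equal_f := by
  intro n a _
  unfold Spec_f f f_alt
  rw [loop_eq_table]
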